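-- pv_equiv track=rewrite | github.com/ravikumar7007/Python-DSA | C1/m3/8-max_profit.py | connect_ropes_min_cost
-- ===== SOURCE A (Python) =====
-- def connect_ropes_min_cost(ropes):
--     ropes.sort()
--     total_cost = 0
--
--     while len(ropes) > 1:
--         # Take the two smallest ropes
--         first = ropes.pop(0)
--         second = ropes.pop(0)
--
--         # Connect them and calculate the cost
--         cost = first + second
--         total_cost += cost
--
--         # Add the new rope back to the list
--         ropes.append(cost)
--         ropes.sort()
--
--     return total_cost
-- ===== SOURCE B (Python) =====
-- def _insert_sorted(xs, c):
--     i = 0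
--     while i < len(xs) and xs[i] <= c:
--         i += 1
--     xs.insert(i, c)
--     return xs
--
--
-- def connect_ropes_min_cost(ropes):
--     heap = sorted(ropes)
--     total_cost = 0
--     while len(heap) > 1:
--         cost = heap[0] + heap[1]
--         total_cost += cost
--         heap = _insert_sorted(heap[2:], cost)
--     return total_cost
-- ===== Notes on version B (the rewrite author's own statement) =====
-- stated objective: alternative
-- what changed: B sorts once and then keeps the working list ordered by a single linear-scan insertion of each new rope, instead of A's re-sorting of the whole list on every iteration of the loop.
import Mathlib
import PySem

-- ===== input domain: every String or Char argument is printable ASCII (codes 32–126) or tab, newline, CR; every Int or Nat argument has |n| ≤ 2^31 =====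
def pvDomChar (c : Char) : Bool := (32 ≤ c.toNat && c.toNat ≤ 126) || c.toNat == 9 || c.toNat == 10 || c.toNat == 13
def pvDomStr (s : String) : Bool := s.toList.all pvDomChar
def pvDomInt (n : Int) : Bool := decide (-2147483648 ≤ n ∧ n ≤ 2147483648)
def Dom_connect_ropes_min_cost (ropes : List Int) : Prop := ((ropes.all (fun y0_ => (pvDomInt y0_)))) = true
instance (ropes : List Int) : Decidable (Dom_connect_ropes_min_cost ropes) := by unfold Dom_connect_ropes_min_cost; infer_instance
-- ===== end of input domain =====

-- B sorts once and then re-inserts each new rope by a linear scan, instead of A's re-sort per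
-- iteration (objective: alternative). A mutates its argument in place; the equivalence is about
-- the RETURN value only (B does not mutate).

-- ===== PORT A =====
-- while len(ropes) > 1: pop(0) twice, append the sum, re-sort; pattern a :: b :: rest = the two pops
def pvALoop : List Int → Int → Int
  | a :: b :: rest, total =>
      let cost := a + b
      pvALoop (PySem.List.sorted (rest ++ [cost]) (fun x => x) false) (total + cost)
  | _, total => total
  termination_by xs _ => xs.length
  decreasing_by simp [PySem.List.length_sorted]

def connect_ropes_min_cost (ropes : List Int) : Int :=
  pvALoop (PySem.List.sorted ropes (fun x => x) false) 0

-- ===== PORT B =====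
-- while i < len(xs) and xs[i] <= c: i += 1   (xs[i] is in range under the guard, so getD is exact)
def pvInsScan (xs : List Int) (c : Int) (i : Nat) : Nat :=
  if i < xs.length ∧ xs.getD i 0 ≤ c then pvInsScan xs c (i + 1) else i
  termination_by xs.length - i
  decreasing_by omega

-- xs.insert(i, c); return xs
def pvInsertSorted (xs : List Int) (c : Int) : List Int :=
  PySem.List.insert xs ((pvInsScan xs c 0 : Nat) : Int) c

-- while len(heap) > 1: cost = heap[0] + heap[1]; heap = _insert_sorted(heap[2:], cost)
def pvBLoop : List Int → Int → Int
  | a :: b :: rest, total =>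
      let cost := a + b
      pvBLoop (pvInsertSorted rest cost) (total + cost)
  | _, total => total
  termination_by xs _ => xs.length
  decreasing_by simp [pvInsertSorted, PySem.List.length_insert]

def connect_ropes_min_cost_alt (ropes : List Int) : Int :=
  pvBLoop (PySem.List.sorted ropes (fun x => x) false) 0

-- ===== PRECONDITION & SPEC =====
def Spec_connect_ropes_min_cost (ropes : List Int) (out : Int) : Prop := out = connect_ropes_min_cost_alt ropes
instance (ropes : List Int) (out : Int) : Decidable (Spec_connect_ropes_min_cost ropes out) := by unfold Spec_connect_ropes_min_cost; infer_instance

-- ===== CLAIM (what is proved, stated in full; the proofs are below) =====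
def Claim_equal_connect_ropes_min_cost : Prop := ∀ (ropes : List Int), Dom_connect_ropes_min_cost ropes → Spec_connect_ropes_min_cost ropes (connect_ropes_min_cost ropes)

-- ===== LEMMAS AND PROOFS =====

-- the scan finds the length of the ≤-prefix of the remaining list
lemma pvInsScan_eq (xs : List Int) (c : Int) (i : Nat) :
    pvInsScan xs c i = i + ((xs.drop i).takeWhile (fun x => decide (x ≤ c))).length := by
  rw [pvInsScan]
  split_ifs with h
  · obtain ⟨h1, h2⟩ := h
    rw [pvInsScan_eq xs c (i + 1)]
    rw [List.drop_eq_getElem_cons h1, List.takeWhile_cons]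
    rw [List.getD_eq_getElem xs 0 h1] at h2
    simp only [h2, decide_true, if_true, List.length_cons]
    omega
  · rcases Nat.lt_or_ge i xs.length with hlt | hge
    · have hc : ¬ xs.getD i 0 ≤ c := fun hc => h ⟨hlt, hc⟩
      rw [List.getD_eq_getElem xs 0 hlt] at hc
      rw [List.drop_eq_getElem_cons hlt, List.takeWhile_cons]
      simp [hc]
    · rw [List.drop_eq_nil_of_le hge]
      simp
  termination_by xs.length - i

-- the insertion decomposes the list at the ≤-prefix boundary
lemma pvInsertSorted_decomp (xs : List Int) (c : Int) :
    pvInsertSorted xs c =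
      xs.takeWhile (fun x => decide (x ≤ c)) ++ c :: xs.dropWhile (fun x => decide (x ≤ c)) := by
  have hk : pvInsScan xs c 0 = (xs.takeWhile (fun x => decide (x ≤ c))).length := by
    simpa using pvInsScan_eq xs c 0
  have hkle : (xs.takeWhile (fun x => decide (x ≤ c))).length ≤ xs.length :=
    (List.takeWhile_sublist _).length_le
  have ht : xs.take ((xs.takeWhile (fun x => decide (x ≤ c))).length)
      = xs.takeWhile (fun x => decide (x ≤ c)) :=
    (List.prefix_iff_eq_take.mp (List.takeWhile_prefix _)).symm
  have hdp : xs.drop ((xs.takeWhile (fun x => decide (x ≤ c))).length)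
      = xs.dropWhile (fun x => decide (x ≤ c)) := by
    have h := congrArg (List.drop ((xs.takeWhile (fun x => decide (x ≤ c))).length))
      (List.takeWhile_append_dropWhile (p := fun x => decide (x ≤ c)) (l := xs))
    rw [List.drop_left] at h
    exact h.symm
  unfold pvInsertSorted
  rw [hk, PySem.List.insert_natCast xs _ c hkle, ht, hdp]

-- every element after the ≤-prefix of a sorted list is ≥ c
lemma pvDropWhile_ge (xs : List Int) (c : Int) (hs : xs.Pairwise (· ≤ ·)) :
    ∀ y ∈ xs.dropWhile (fun x => decide (x ≤ c)), c ≤ y := by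
  have h2 : (xs.dropWhile (fun x => decide (x ≤ c))).Pairwise (· ≤ ·) :=
    hs.sublist (List.dropWhile_sublist _)
  cases hd : xs.dropWhile (fun x => decide (x ≤ c)) with
  | nil => simp
  | cons h t =>
    have hne : xs.dropWhile (fun x => decide (x ≤ c)) ≠ [] := by simp [hd]
    have hh := List.head_dropWhile_not (l := xs) (fun x => decide (x ≤ c)) hne
    have hch : c < h := lt_of_not_ge (by simpa [hd] using hh)
    rw [hd] at h2
    intro y hy
    rcases List.mem_cons.mp hy with rfl | hyt
    · exact le_of_lt hch
    · exact le_trans (le_of_lt hch) ((List.pairwise_cons.mp h2).1 y hyt)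

lemma pvInsertSorted_pairwise (xs : List Int) (c : Int) (hs : xs.Pairwise (· ≤ ·)) :
    (pvInsertSorted xs c).Pairwise (· ≤ ·) := by
  rw [pvInsertSorted_decomp]
  rw [List.pairwise_append]
  refine ⟨hs.sublist (List.takeWhile_sublist _), ?_, ?_⟩
  · rw [List.pairwise_cons]
    exact ⟨pvDropWhile_ge xs c hs, hs.sublist (List.dropWhile_sublist _)⟩
  · intro x hx y hy
    have hxc : x ≤ c := by simpa using List.mem_takeWhile_imp hx
    rcases List.mem_cons.mp hy with rfl | hy'
    · exact hxc
    · exact le_trans hxc (pvDropWhile_ge xs c hs y hy')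

-- inserting into a sorted list = re-sorting with the element appended
lemma pvInsertSorted_eq_sorted (xs : List Int) (c : Int) (hs : xs.Pairwise (· ≤ ·)) :
    PySem.List.sorted (xs ++ [c]) (fun x => x) false = pvInsertSorted xs c := by
  apply PySem.List.sorted_id_eq_of_perm_of_pairwise
  · rw [pvInsertSorted_decomp]
    refine List.Perm.trans List.perm_middle ?_
    rw [List.takeWhile_append_dropWhile]
    exact (List.perm_append_singleton c xs).symm
  · exact pvInsertSorted_pairwise xs c hs

lemma pvLoop_eq (n : Nat) : ∀ (xs : List Int), xs.length ≤ n → xs.Pairwise (· ≤ ·) →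
    ∀ t, pvALoop xs t = pvBLoop xs t := by
  induction n with
  | zero =>
    intro xs h _ t
    have : xs = [] := List.eq_nil_of_length_eq_zero (Nat.le_zero.mp h)
    subst this; simp [pvALoop, pvBLoop]
  | succ n ih =>
    intro xs hlen hs t
    rcases xs with _ | ⟨a, rest1⟩
    · simp [pvALoop, pvBLoop]
    rcases rest1 with _ | ⟨b, rest⟩
    · simp [pvALoop, pvBLoop]
    · simp only [pvALoop, pvBLoop]
      have hrest : rest.Pairwise (· ≤ ·) :=
        (List.pairwise_cons.mp (List.pairwise_cons.mp hs).2).2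
      rw [pvInsertSorted_eq_sorted rest (a + b) hrest]
      apply ih
      · have : (pvInsertSorted rest (a + b)).length = rest.length + 1 := by
          simp [pvInsertSorted, PySem.List.length_insert]
        simp only [List.length_cons] at hlen
        omega
      · exact pvInsertSorted_pairwise rest (a + b) hrest

-- ===== VERDICT (by name: the statement is the Claim_ definition above) =====
theorem connect_ropes_min_cost_spec : Claim_equal_connect_ropes_min_cost := by
  intro ropes _
  unfold Spec_connect_ropes_min_cost connect_ropes_min_cost connect_ropes_min_cost_alt
  exact pvLoop_eq _ _ le_rfl (by simpa using PySem.List.sorted_pairwise ropes (fun x => x)) 0
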